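-- pv_equiv track=rewrite | github.com/alexbenari/github-summarizer | app/repo_processor/processor.py | _truncate_directory_tree
-- ===== SOURCE A (Python) =====
-- from typing import Optional
--
-- def _truncate_directory_tree(content: str, max_bytes: int) -> str:
--     if max_bytes <= 0:
--         return "Truncated to zero"
--
--     lines = content.splitlines()
--     if not lines:
--         return "Truncated to zero"
--
--     selected: list[str] = []
--     used = 0
--     for line in lines:
--         line_bytes = _utf8_len(line)
--         sep_bytes = 1 if selected else 0
--         if used + sep_bytes + line_bytes > max_bytes:
--             break
--         if sep_bytes:
--             used += sep_bytes
--         selected.append(line)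
--         used += line_bytes
--
--     if not selected:
--         return "Truncated to zero"
--     return "\n".join(selected)
--
-- def _utf8_len(text: Optional[str]) -> int:
--     if text is None:
--         return 0
--     return len(text.encode("utf-8"))
-- ===== SOURCE B (Python) =====
-- def _truncate_directory_tree(content: str, max_bytes: int) -> str:
--     if max_bytes <= 0:
--         return "Truncated to zero"
--
--     lines = content.splitlines()
--     if not lines:
--         return "Truncated to zero"
--
--     # cost[i] = UTF-8 bytes of "\n".join(lines[:i]); monotone, so binary-search it.
--     cost = [0]
--     for line in lines:
--         cost.append(cost[-1] + (1 if len(cost) > 1 else 0) + len(line.encode("utf-8")))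
--
--     lo, hi = 0, len(lines)
--     while lo < hi:
--         mid = (lo + hi + 1) // 2
--         if cost[mid] <= max_bytes:
--             lo = mid
--         else:
--             hi = mid - 1
--
--     if lo == 0:
--         return "Truncated to zero"
--     return "\n".join(lines[:lo])
-- ===== Notes on version B (the rewrite author's own statement) =====
-- stated objective: alternative
-- what changed: Replaced the accumulating early-break scan over lines with a prefix-sum cost table plus binary search for the largest prefix that fits the byte budget.
import Mathlib
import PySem

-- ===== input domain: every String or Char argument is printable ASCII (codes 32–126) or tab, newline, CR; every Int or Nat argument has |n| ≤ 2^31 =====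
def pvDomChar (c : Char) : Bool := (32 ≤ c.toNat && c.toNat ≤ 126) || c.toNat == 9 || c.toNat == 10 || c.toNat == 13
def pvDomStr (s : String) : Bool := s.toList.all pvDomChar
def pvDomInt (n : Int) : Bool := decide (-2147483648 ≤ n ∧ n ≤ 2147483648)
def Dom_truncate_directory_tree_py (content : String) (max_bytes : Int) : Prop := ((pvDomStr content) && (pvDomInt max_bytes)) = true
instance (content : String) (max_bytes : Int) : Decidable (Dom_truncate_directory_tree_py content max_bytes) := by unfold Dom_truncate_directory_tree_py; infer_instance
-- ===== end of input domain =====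

-- B replaces A's accumulating early-break scan with a prefix-sum cost table plus binary search
-- for the largest prefix of lines fitting the byte budget (alternative decomposition, same result).

-- ===== PORT A =====
-- _utf8_len(line) = len(line.encode("utf-8")); ported exactly by summing each code point's UTF-8 byte count
def pyUtf8CharLen (c : Char) : Int :=
  if c.toNat < 128 then 1 else if c.toNat < 2048 then 2 else if c.toNat < 65536 then 3 else 4

def pyUtf8Len (s : String) : Int := (s.toList.map pyUtf8CharLen).sum

-- the for-loop with break, as structural recursion over the remaining lines
def truncA_loop (ls : List String) (selected : List String) (used : Int) (max_bytes : Int) : List String :=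
  match ls with
  | [] => selected
  | line :: rest =>
      let line_bytes := pyUtf8Len line
      let sep_bytes : Int := if selected = [] then 0 else 1
      if used + sep_bytes + line_bytes > max_bytes then selected
      else truncA_loop rest (selected ++ [line]) (used + sep_bytes + line_bytes) max_bytes

def truncate_directory_tree_py (content : String) (max_bytes : Int) : String :=
  if max_bytes ≤ 0 then "Truncated to zero"
  else
    let lines := PySem.Str.splitlines content
    if lines = [] then "Truncated to zero"
    else
      let selected := truncA_loop lines [] 0 max_bytes
      if selected = [] then "Truncated to zero"
      else PySem.Str.join "\n" selected

-- ===== PORT B =====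
-- cost table: cost[i] = bytes of "\n".join(lines[:i]); cost[-1] read as getLast?.getD 0 (list is never empty)
def bCost (ls : List String) : List Int :=
  ls.foldl (fun acc line =>
    acc ++ [acc.getLast?.getD 0 + (if acc.length > 1 then 1 else 0) + pyUtf8Len line]) [0]

-- the while-loop binary search; terminates since hi - lo shrinks
def bSearch (cost : List Int) (max_bytes : Int) (lo hi : Nat) : Nat :=
  if h : lo < hi then
    let mid := (lo + hi + 1) / 2
    if cost.getD mid 0 ≤ max_bytes then bSearch cost max_bytes mid hi
    else bSearch cost max_bytes lo (mid - 1)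
  else lo
termination_by hi - lo
decreasing_by all_goals omega

def truncate_directory_tree_py_alt (content : String) (max_bytes : Int) : String :=
  if max_bytes ≤ 0 then "Truncated to zero"
  else
    let lines := PySem.Str.splitlines content
    if lines = [] then "Truncated to zero"
    else
      let cost := bCost lines
      let lo := bSearch cost max_bytes 0 lines.length
      if lo = 0 then "Truncated to zero"
      else PySem.Str.join "\n" (lines.take lo)

-- ===== PRECONDITION & SPEC =====
def Spec_truncate_directory_tree_py (content : String) (max_bytes : Int) (out : String) : Prop := out = truncate_directory_tree_py_alt content max_bytes
instance (content : String) (max_bytes : Int) (out : String) : Decidable (Spec_truncate_directory_tree_py content max_bytes out) := by unfold Spec_truncate_directory_tree_py; infer_instance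

-- ===== CLAIM (what is proved, stated in full; the proofs are below) =====
def Claim_equal_truncate_directory_tree_py : Prop := ∀ (content : String) (max_bytes : Int), Dom_truncate_directory_tree_py content max_bytes → Spec_truncate_directory_tree_py content max_bytes (truncate_directory_tree_py content max_bytes)

-- ===== LEMMAS AND PROOFS =====

-- prefix cost: pcost ls k = bytes of "\n".join(ls[:k])
def pcost (ls : List String) : Nat → Int
  | 0 => 0
  | k+1 => pcost ls k + (if k = 0 then 0 else 1) + pyUtf8Len (ls.getD k "")

lemma pyUtf8CharLen_nonneg (c : Char) : 0 ≤ pyUtf8CharLen c := by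
  unfold pyUtf8CharLen; split_ifs <;> norm_num

lemma pyUtf8Len_nonneg (s : String) : 0 ≤ pyUtf8Len s := by
  unfold pyUtf8Len
  exact List.sum_nonneg (by simp only [List.mem_map]; rintro x ⟨c, _, rfl⟩; exact pyUtf8CharLen_nonneg c)

lemma pcost_mono (ls : List String) {i j : Nat} (h : i ≤ j) : pcost ls i ≤ pcost ls j := by
  induction j with
  | zero => simp_all
  | succ j ih =>
      rcases Nat.lt_or_ge i (j+1) with hj | hj
      · refine le_trans (ih (by omega)) ?_
        have := pyUtf8Len_nonneg (ls.getD j "")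
        simp only [pcost]; split_ifs <;> omega
      · have : i = j + 1 := by omega
        simp [this]

lemma bCost_eq (ls : List String) :
    bCost ls = (List.range (ls.length + 1)).map (pcost ls) := by
  unfold bCost
  suffices h : ∀ i, i ≤ ls.length →
      (ls.drop i).foldl (fun acc line =>
        acc ++ [acc.getLast?.getD 0 + (if acc.length > 1 then 1 else 0) + pyUtf8Len line])
        ((List.range (i + 1)).map (pcost ls))
      = (List.range (ls.length + 1)).map (pcost ls) by
    have := h 0 (Nat.zero_le _)
    simpa using this
  intro i hi
  induction hn : ls.length - i generalizing i with
  | zero =>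
      have : i = ls.length := by omega
      subst this
      simp
  | succ n ih =>
      have hlt : i < ls.length := by omega
      rw [List.drop_eq_getElem_cons hlt]
      simp only [List.foldl_cons]
      have hstep : ((List.range (i + 1)).map (pcost ls)) ++
          [(((List.range (i + 1)).map (pcost ls)).getLast?.getD 0 +
            (if ((List.range (i + 1)).map (pcost ls)).length > 1 then 1 else 0) + pyUtf8Len ls[i])]
          = (List.range (i + 2)).map (pcost ls) := by
        have hlast : ((List.range (i + 1)).map (pcost ls)).getLast?.getD 0 = pcost ls i := by
          rw [List.getLast?_eq_getElem?]
          simp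
        rw [hlast]
        have : (List.range (i + 2)) = List.range (i + 1) ++ [i + 1] := by
          rw [List.range_succ]
        rw [this, List.map_append]
        simp only [List.map_cons, List.map_nil, List.length_map, List.length_range]
        congr 1
        simp only [pcost, List.getD, List.getElem?_eq_getElem hlt]
        have : (ls[i]?.getD "") = ls[i] := by simp [List.getElem?_eq_getElem hlt]
        split_ifs with h1 h2 h2 <;> simp_all
      rw [hstep]
      have := ih (i + 1) (by omega) (by omega)
      simpa using this

lemma bCost_getD (ls : List String) (k : Nat) (hk : k ≤ ls.length) :
    (bCost ls).getD k 0 = pcost ls k := by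
  rw [bCost_eq, List.getD_eq_getElem?_getD, List.getElem?_map,
      List.getElem?_range (by omega)]
  rfl

lemma bSearch_eq (cost : List Int) (mb : Int) (K N : Nat)
    (hcmp : ∀ j, j ≤ N → (cost.getD j 0 ≤ mb ↔ j ≤ K)) :
    ∀ n lo hi, hi - lo ≤ n → lo ≤ K → K ≤ hi → hi ≤ N →
      bSearch cost mb lo hi = K := by
  intro n
  induction n with
  | zero =>
      intro lo hi hfuel h1 h2 h3
      rw [bSearch]
      have : ¬ lo < hi := by omega
      simp only [this, dite_false]
      omega
  | succ n ih =>
      intro lo hi hfuel h1 h2 h3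
      rw [bSearch]
      by_cases hlt : lo < hi
      · simp only [hlt, dite_true]
        have hmid1 : lo < (lo + hi + 1) / 2 := by omega
        have hmid2 : (lo + hi + 1) / 2 ≤ hi := by omega
        by_cases hc : cost.getD ((lo + hi + 1) / 2) 0 ≤ mb
        · have hK : (lo + hi + 1) / 2 ≤ K := (hcmp _ (by omega)).1 hc
          simp only [hc, if_true]
          exact ih _ _ (by omega) hK h2 h3
        · have hK : ¬ (lo + hi + 1) / 2 ≤ K := fun h => hc ((hcmp _ (by omega)).2 h)
          simp only [hc, if_false]
          exact ih _ _ (by omega) h1 (by omega) (by omega)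
      · simp only [hlt, dite_false]
        omega

lemma truncA_loop_eq (ls : List String) (mb : Int) (K : Nat)
    (hKlen : K ≤ ls.length) (hPK : pcost ls K ≤ mb)
    (hKmax : K = ls.length ∨ ¬ pcost ls (K + 1) ≤ mb) :
    ∀ n i, ls.length - i ≤ n → i ≤ K →
      truncA_loop (ls.drop i) (ls.take i) (pcost ls i) mb = ls.take K := by
  intro n
  induction n with
  | zero =>
      intro i hfuel hiK
      have hi : i = ls.length := by omega
      have : K = i := by omega
      rw [List.drop_eq_nil_of_le (by omega)]
      simp [truncA_loop, this]
  | succ n ih =>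
      intro i hfuel hiK
      rcases Nat.lt_or_ge i ls.length with hlt | hge
      · rw [List.drop_eq_getElem_cons hlt]
        simp only [truncA_loop]
        have hsep : (if ls.take i = [] then (0:Int) else 1) = if i = 0 then 0 else 1 := by
          rcases Nat.eq_zero_or_pos i with rfl | hpos
          · simp
          · have : ls.take i ≠ [] := by
              simp [List.take_eq_nil_iff]
              constructor <;> [omega; exact List.ne_nil_of_length_pos (by omega)]
            simp [this]
            omega
        have hcost : pcost ls i + (if ls.take i = [] then (0:Int) else 1) + pyUtf8Len ls[i]
            = pcost ls (i + 1) := by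
          rw [hsep]
          simp [pcost, List.getD, List.getElem?_eq_getElem hlt]
        by_cases hbr : pcost ls i + (if ls.take i = [] then (0:Int) else 1) + pyUtf8Len ls[i] > mb
        · -- break: K = i
          have hKi : K = i := by
            by_contra hne
            have : i + 1 ≤ K := by omega
            have := pcost_mono ls this
            rw [hcost] at hbr
            omega
          simp only [hbr, if_true]
          rw [hKi]
        · simp only [hbr, if_false]
          have hsucc : pcost ls (i + 1) ≤ mb := by rw [← hcost]; omega
          have hiK' : i + 1 ≤ K := by
            by_contra hne
            have : K = i := by omega
            subst this
            rcases hKmax with h | h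
            · omega
            · exact h hsucc
          have htake : ls.take i ++ [ls[i]] = ls.take (i + 1) := by
            rw [List.take_add_one]
            simp [List.getElem?_eq_getElem hlt]
          rw [htake, hcost]
          exact ih (i + 1) (by omega) hiK'
      · have hi : i = ls.length := by omega
        have : K = i := by omega
        rw [List.drop_eq_nil_of_le (by omega)]
        simp [truncA_loop, this]

theorem trunc_main (content : String) (max_bytes : Int) :
    truncate_directory_tree_py content max_bytes
      = truncate_directory_tree_py_alt content max_bytes := by
  unfold truncate_directory_tree_py truncate_directory_tree_py_alt
  by_cases hm : max_bytes ≤ 0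
  · simp [hm]
  · simp only [hm, if_false]
    set ls := PySem.Str.splitlines content with hls
    by_cases hnil : ls = []
    · simp [hnil]
    · simp only [hnil, if_false]
      set P : Nat → Prop := fun k => pcost ls k ≤ max_bytes with hP
      have hP0 : P 0 := by simp [hP, pcost]; omega
      set K := Nat.findGreatest P ls.length with hK
      have hKlen : K ≤ ls.length := Nat.findGreatest_le _
      have hPK : pcost ls K ≤ max_bytes := Nat.findGreatest_spec (Nat.zero_le _) hP0
      have hKmax : K = ls.length ∨ ¬ pcost ls (K + 1) ≤ max_bytes := by
        rcases Nat.lt_or_ge K ls.length with h | h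
        · right
          have := Nat.findGreatest_is_greatest (P := P) (n := ls.length) (k := K + 1)
            (by omega) (by omega)
          simpa [hP] using this
        · exact Or.inl (by omega)
      have hA : truncA_loop ls [] 0 max_bytes = ls.take K := by
        have := truncA_loop_eq ls max_bytes K hKlen hPK hKmax ls.length 0 (by omega) (Nat.zero_le _)
        simpa [pcost] using this
      have hB : bSearch (bCost ls) max_bytes 0 ls.length = K := by
        refine bSearch_eq (bCost ls) max_bytes K ls.length ?_ ls.length 0 ls.length
          (by omega) (Nat.zero_le _) hKlen (le_refl _)
        intro j hj
        rw [bCost_getD ls j hj]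
        constructor
        · intro hle
          exact Nat.le_findGreatest hj hle
        · intro hle
          exact le_trans (pcost_mono ls hle) hPK
      rw [hA, hB]
      by_cases hK0 : K = 0
      · simp [hK0]
      · have htk : ls.take K ≠ [] := by
          simp [List.take_eq_nil_iff]
          constructor <;> [omega; exact hnil]
        simp [htk, hK0]

-- ===== VERDICT (by name: the statement is the Claim_ definition above) =====
theorem truncate_directory_tree_py_spec : Claim_equal_truncate_directory_tree_py := by
  intro content max_bytes _
  unfold Spec_truncate_directory_tree_py
  exact trunc_main content max_bytes
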